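-- pv_equiv track=rewrite | github.com/jmsdsouzaPhD/GWDALI | package/lib/Symmetric_Indexies.py | get_indep_indexies
-- ===== SOURCE A (Python) =====
-- def get_indep_indexies(Np):
-- 	#---------------------#---------------------
-- 	# --------------Doublet(1,2)--------------
-- 	#---------------------#---------------------
-- 	indepD_12 = []
-- 	for i in range(Np):
-- 		for j in range(Np):
-- 			for k in range(j,Np):
-- 				indepD_12.append([i,j,k])
-- 	#---------------------#---------------------
-- 	# --------------Doublet(2,2)--------------
-- 	#---------------------#---------------------
-- 	indepD_22 = []
-- 	for i in range(Np):
-- 		for j in range(i,Np):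
-- 			for k in range(Np):
-- 				for l in range(k,Np):
-- 					indepD_22.append([i,j,k,l])
-- 	#---------------------#---------------------
-- 	# --------------Triplet(1,3)--------------
-- 	#---------------------#---------------------
-- 	indepT_13 = []
-- 	for i in range(Np):
-- 		for j in range(Np):
-- 			for k in range(j,Np):
-- 				for l in range(k,Np):
-- 					indepT_13.append([i,j,k,l])
-- 	#---------------------#---------------------
-- 	# --------------Triplet(2,3)--------------
-- 	#---------------------#---------------------
-- 	indepT_23 = []
-- 	for i in range(Np):
-- 		for j in range(i,Np):
-- 			for k in range(Np):
-- 				for l in range(k,Np):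
-- 					for m in range(l,Np):
-- 						indepT_23.append([i,j,k,l,m])
-- 	#---------------------#---------------------
-- 	# --------------Triplet(3,3)--------------
-- 	#---------------------#---------------------
-- 	indepT_33 = []
-- 	for i in range(Np):
-- 		for j in range(i,Np):
-- 			for k in range(j,Np):
-- 				for l in range(Np):
-- 					for m in range(l,Np):
-- 						for n in range(m,Np):
-- 							indepT_33.append([i,j,k,l,m,n])
-- 	#-----------------------------#-----------------------------
-- 	idxs_doub = [indepD_12, indepD_22]
-- 	idxs_trip = [indepT_13, indepT_23, indepT_33]
--
-- 	return idxs_doub, idxs_trip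
-- ===== SOURCE B (Python) =====
-- def _cwr(pool, r):
--     # all non-decreasing r-tuples over pool, lexicographic, by recursion on the pool
--     if r == 0:
--         return [[]]
--     if not pool:
--         return []
--     x = pool[0]
--     return [[x] + rest for rest in _cwr(pool, r - 1)] + _cwr(pool[1:], r)
--
-- def get_indep_indexies(Np):
--     pool = list(range(Np))
--     c2 = _cwr(pool, 2)
--     c3 = _cwr(pool, 3)
--     indepD_12 = [[i] + p for i in pool for p in c2]
--     indepD_22 = [p + q for p in c2 for q in c2]
--     indepT_13 = [[i] + p for i in pool for p in c3]
--     indepT_23 = [p + q for p in c2 for q in c3]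
--     indepT_33 = [p + q for p in c3 for q in c3]
--     return [indepD_12, indepD_22], [indepT_13, indepT_23, indepT_33]
-- ===== Notes on version B (the rewrite author's own statement) =====
-- stated objective: idiomatic
-- what changed: Replaces the five hand-written 3-to-6-deep nested index loops by a single recursive combinations-with-replacement generator over the index pool, computed once per arity (2 and 3) and composed per block by flattening products.
import Mathlib
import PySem

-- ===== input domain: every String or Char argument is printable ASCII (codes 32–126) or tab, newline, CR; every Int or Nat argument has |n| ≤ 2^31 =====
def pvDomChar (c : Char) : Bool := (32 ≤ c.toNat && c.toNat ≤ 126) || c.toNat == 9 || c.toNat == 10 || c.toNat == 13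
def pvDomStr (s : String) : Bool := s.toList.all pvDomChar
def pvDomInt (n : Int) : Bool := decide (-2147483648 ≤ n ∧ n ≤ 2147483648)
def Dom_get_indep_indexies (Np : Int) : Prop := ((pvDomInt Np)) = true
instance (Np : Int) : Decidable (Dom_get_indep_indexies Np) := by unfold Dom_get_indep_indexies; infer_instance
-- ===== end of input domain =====

-- B replaces A's five hand-written nested index loops by one recursive
-- combinations-with-replacement generator composed per block (idiomatic/alternative, same cost).

-- ===== PORT A =====
-- literal transliteration: each Python for-loop is a foldl over the same range, appending to the accumulator
def get_indep_indexies (Np : Int) : List (List (List Int)) × List (List (List Int)) :=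
  let indepD_12 := (PySem.List.pyRange 0 Np 1).foldl (fun acc i =>
    (PySem.List.pyRange 0 Np 1).foldl (fun acc j =>
      (PySem.List.pyRange j Np 1).foldl (fun acc k => acc ++ [[i, j, k]]) acc) acc) []
  let indepD_22 := (PySem.List.pyRange 0 Np 1).foldl (fun acc i =>
    (PySem.List.pyRange i Np 1).foldl (fun acc j =>
      (PySem.List.pyRange 0 Np 1).foldl (fun acc k =>
        (PySem.List.pyRange k Np 1).foldl (fun acc l => acc ++ [[i, j, k, l]]) acc) acc) acc) []
  let indepT_13 := (PySem.List.pyRange 0 Np 1).foldl (fun acc i =>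
    (PySem.List.pyRange 0 Np 1).foldl (fun acc j =>
      (PySem.List.pyRange j Np 1).foldl (fun acc k =>
        (PySem.List.pyRange k Np 1).foldl (fun acc l => acc ++ [[i, j, k, l]]) acc) acc) acc) []
  let indepT_23 := (PySem.List.pyRange 0 Np 1).foldl (fun acc i =>
    (PySem.List.pyRange i Np 1).foldl (fun acc j =>
      (PySem.List.pyRange 0 Np 1).foldl (fun acc k =>
        (PySem.List.pyRange k Np 1).foldl (fun acc l =>
          (PySem.List.pyRange l Np 1).foldl (fun acc m => acc ++ [[i, j, k, l, m]]) acc) acc) acc) acc) []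
  let indepT_33 := (PySem.List.pyRange 0 Np 1).foldl (fun acc i =>
    (PySem.List.pyRange i Np 1).foldl (fun acc j =>
      (PySem.List.pyRange j Np 1).foldl (fun acc k =>
        (PySem.List.pyRange 0 Np 1).foldl (fun acc l =>
          (PySem.List.pyRange l Np 1).foldl (fun acc m =>
            (PySem.List.pyRange m Np 1).foldl (fun acc n => acc ++ [[i, j, k, l, m, n]]) acc) acc) acc) acc) acc) []
  ([indepD_12, indepD_22], [indepT_13, indepT_23, indepT_33])

-- ===== PORT B =====
-- _cwr(pool, r): all non-decreasing r-tuples over pool, by recursion on the pool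
def cwrB : Nat → List Int → List (List Int)
  | 0, _ => [[]]
  | _ + 1, [] => []
  | r + 1, x :: rest => (cwrB r (x :: rest)).map (fun p => x :: p) ++ cwrB (r + 1) rest
termination_by r pool => (r, pool.length)

def get_indep_indexies_alt (Np : Int) : List (List (List Int)) × List (List (List Int)) :=
  let pool := PySem.List.pyRange 0 Np 1
  let c2 := cwrB 2 pool
  let c3 := cwrB 3 pool
  let indepD_12 := pool.flatMap (fun i => c2.map (fun p => i :: p))
  let indepD_22 := c2.flatMap (fun p => c2.map (fun q => p ++ q))
  let indepT_13 := pool.flatMap (fun i => c3.map (fun p => i :: p))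
  let indepT_23 := c2.flatMap (fun p => c3.map (fun q => p ++ q))
  let indepT_33 := c3.flatMap (fun p => c3.map (fun q => p ++ q))
  ([indepD_12, indepD_22], [indepT_13, indepT_23, indepT_33])

-- ===== PRECONDITION & SPEC =====
def Spec_get_indep_indexies (Np : Int) (out : List (List (List Int)) × List (List (List Int))) : Prop := out = get_indep_indexies_alt Np
instance (Np : Int) (out : List (List (List Int)) × List (List (List Int))) : Decidable (Spec_get_indep_indexies Np out) := by unfold Spec_get_indep_indexies; infer_instance

-- ===== CLAIM (what is proved, stated in full; the proofs are below) =====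
def Claim_equal_get_indep_indexies : Prop := ∀ (Np : Int), Dom_get_indep_indexies Np → Spec_get_indep_indexies Np (get_indep_indexies Np)

-- ===== LEMMAS AND PROOFS =====

theorem cwrB_one (xs : List Int) : cwrB 1 xs = xs.map (fun x => [x]) := by
  induction xs with
  | nil => simp [cwrB]
  | cons x rest ih => simp [cwrB, ih]

theorem cwrB_two (a b : Int) :
    cwrB 2 (PySem.List.pyRange a b 1) =
      (PySem.List.pyRange a b 1).flatMap (fun j =>
        (PySem.List.pyRange j b 1).map (fun k => [j, k])) := by
  by_cases hab : a < b
  · have hn : (b - a).toNat ≠ 0 := by omega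
    induction hfuel : (b - a).toNat generalizing a with
    | zero => omega
    | succ n ih =>
      have hrest : cwrB 2 (PySem.List.pyRange (a + 1) b 1) =
          (PySem.List.pyRange (a + 1) b 1).flatMap (fun j =>
            (PySem.List.pyRange j b 1).map (fun k => [j, k])) := by
        by_cases h2 : a + 1 < b
        · exact ih (a + 1) h2 (by omega) (by omega)
        · rw [PySem.List.pyRange_one_eq_nil (by omega : b ≤ a + 1)]; simp [cwrB]
      rw [PySem.List.pyRange_one_cons hab, cwrB, cwrB_one, hrest]
      simp [List.map_map, Function.comp_def, PySem.List.pyRange_one_cons hab]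
  · rw [PySem.List.pyRange_one_eq_nil (by omega)]; simp [cwrB]

theorem cwrB_three (a b : Int) :
    cwrB 3 (PySem.List.pyRange a b 1) =
      (PySem.List.pyRange a b 1).flatMap (fun j =>
        (PySem.List.pyRange j b 1).flatMap (fun k =>
          (PySem.List.pyRange k b 1).map (fun l => [j, k, l]))) := by
  by_cases hab : a < b
  · have hn : (b - a).toNat ≠ 0 := by omega
    induction hfuel : (b - a).toNat generalizing a with
    | zero => omega
    | succ n ih =>
      have hrest : cwrB 3 (PySem.List.pyRange (a + 1) b 1) =
          (PySem.List.pyRange (a + 1) b 1).flatMap (fun j =>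
            (PySem.List.pyRange j b 1).flatMap (fun k =>
              (PySem.List.pyRange k b 1).map (fun l => [j, k, l]))) := by
        by_cases h3 : a + 1 < b
        · exact ih (a + 1) h3 (by omega) (by omega)
        · rw [PySem.List.pyRange_one_eq_nil (by omega : b ≤ a + 1)]; simp [cwrB]
      have h2 := cwrB_two a b
      rw [PySem.List.pyRange_one_cons hab] at h2
      rw [PySem.List.pyRange_one_cons hab, cwrB, h2, hrest]
      simp [List.map_flatMap, List.map_map, Function.comp_def, PySem.List.pyRange_one_cons hab]
  · rw [PySem.List.pyRange_one_eq_nil (by omega)]; simp [cwrB]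

-- ===== VERDICT (by name: the statement is the Claim_ definition above) =====
theorem get_indep_indexies_spec : Claim_equal_get_indep_indexies := by
  intro Np _
  unfold Spec_get_indep_indexies get_indep_indexies get_indep_indexies_alt
  simp only [PySem.List.foldl_append_singleton_eq_map, PySem.List.foldl_append_eq_flatMap,
    cwrB_two, cwrB_three, List.flatMap_assoc, List.flatMap_map, List.map_flatMap,
    List.map_map, Function.comp_def, List.nil_append, List.cons_append]
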